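-- pv_equiv track=rewrite | github.com/YuvrajRawat/Competitive-Programming | New folder/Art_Shift.py | art_shift
-- ===== SOURCE A (Python) =====
-- def art_shift(n, row):
--   shifts = 0
--   categories = ["H", "S", "P", "D"]
--
--   for category in categories:
--     category_positions = [i for i, art in enumerate(row) if art == category]
--
--     for i in range(1, len(category_positions)):
--       shifts += abs(category_positions[i] - (category_positions[0] + i))
--
--   return shifts // 2
-- ===== SOURCE B (Python) =====
-- def art_shift(n, row):
--   # Single pass over enumerate(row): per category keep (first_position, occurrences);
--   # each later occurrence at j contributes abs(j - (first + count)).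
--   shifts = 0
--   state = {}
--   for j, art in enumerate(row):
--     if art == "H" or art == "S" or art == "P" or art == "D":
--       if art in state:
--         first, idx = state[art]
--         shifts += abs(j - (first + idx))
--         state[art] = (first, idx + 1)
--       else:
--         state[art] = (j, 1)
--   return shifts // 2
-- ===== Notes on version B (the rewrite author's own statement) =====
-- stated objective: faster
-- what changed: Replaces four separate enumerate-scans that each materialize a per-category position list and then index it by range with one single pass over enumerate(row) keeping a dict of (first_position, occurrence_count) per category and accumulating the displacement incrementally.
import Mathlib
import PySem

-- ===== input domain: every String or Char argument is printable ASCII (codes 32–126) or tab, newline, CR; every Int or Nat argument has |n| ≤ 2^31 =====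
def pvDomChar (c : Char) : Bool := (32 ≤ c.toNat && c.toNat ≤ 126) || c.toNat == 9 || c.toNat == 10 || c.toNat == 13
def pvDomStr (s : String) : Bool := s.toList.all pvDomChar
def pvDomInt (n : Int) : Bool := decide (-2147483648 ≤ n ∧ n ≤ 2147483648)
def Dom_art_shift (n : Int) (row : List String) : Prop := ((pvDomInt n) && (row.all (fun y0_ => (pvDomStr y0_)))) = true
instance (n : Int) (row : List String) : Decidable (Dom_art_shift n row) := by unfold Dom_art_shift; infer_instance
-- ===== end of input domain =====

-- B merges A's four per-category scans (each building a position list, then indexing it)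
-- into one pass keeping per-category running state; equal return value, constant-factor speedup.

-- ===== PORT A =====
-- [i for i, art in enumerate(row) if art == category]
def pvPositions (l : List (Int × String)) (cat : String) : List Int :=
  (l.filter (fun p => p.2 == cat)).map (·.1)

-- the inner 'for i in range(1, len(category_positions))' loop
def pvCatShift (ps : List Int) : Int :=
  (PySem.List.pyRange 1 ps.length 1).foldl
    (fun s i => s + |PySem.List.pyGetD ps i 0 - (PySem.List.pyGetD ps 0 0 + i)|) 0

def art_shift (n : Int) (row : List String) : Int :=
  let shifts : Int :=
    (["H", "S", "P", "D"]).foldl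
      (fun shifts category => shifts + pvCatShift (pvPositions (PySem.List.enumerate row) category)) 0
  PySem.Int.floordiv shifts 2

-- ===== PORT B =====
def pvStepB (st : PySem.Dict String (Int × Int) × Int) (p : Int × String) :
    PySem.Dict String (Int × Int) × Int :=
  if p.2 == "H" || p.2 == "S" || p.2 == "P" || p.2 == "D" then
    match st.1.get? p.2 with
    | some (first, idx) => (st.1.insert p.2 (first, idx + 1), st.2 + |p.1 - (first + idx)|)
    | none => (st.1.insert p.2 (p.1, 1), st.2)
  else st

def art_shift_alt (n : Int) (row : List String) : Int :=
  PySem.Int.floordiv ((PySem.List.enumerate row).foldl pvStepB (PySem.Dict.empty, 0)).2 2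

-- ===== PRECONDITION & SPEC =====
def Spec_art_shift (n : Int) (row : List String) (out : Int) : Prop := out = art_shift_alt n row
instance (n : Int) (row : List String) (out : Int) : Decidable (Spec_art_shift n row out) := by unfold Spec_art_shift; infer_instance

-- ===== CLAIM (what is proved, stated in full; the proofs are below) =====
def Claim_equal_art_shift : Prop := ∀ (n : Int) (row : List String), Dom_art_shift n row → Spec_art_shift n row (art_shift n row)

-- ===== LEMMAS AND PROOFS =====

-- dict value B stores for a category whose position list is ps
def pvEnc (ps : List Int) : Option (Int × Int) :=
  match ps with
  | [] => none
  | p0 :: rest => some (p0, (rest.length : Int) + 1)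

-- B's loop invariant over an arbitrary processed prefix l
def pvInv (l : List (Int × String)) (st : PySem.Dict String (Int × Int) × Int) : Prop :=
  st.1.get? "H" = pvEnc (pvPositions l "H") ∧
  st.1.get? "S" = pvEnc (pvPositions l "S") ∧
  st.1.get? "P" = pvEnc (pvPositions l "P") ∧
  st.1.get? "D" = pvEnc (pvPositions l "D") ∧
  st.2 = pvCatShift (pvPositions l "H") + pvCatShift (pvPositions l "S") +
         pvCatShift (pvPositions l "P") + pvCatShift (pvPositions l "D")

lemma pvPositions_append (l : List (Int × String)) (c : String) (j : Int) (a : String) :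
    pvPositions (l ++ [(j, a)]) c = pvPositions l c ++ (if a == c then [j] else []) := by
  simp only [pvPositions, List.filter_append, List.map_append]
  by_cases h : a = c
  · simp [h, List.filter, List.map]
  · have hb : (a == c) = false := by simp [h]
    simp [hb, List.filter, List.map]

lemma pvCatShift_append (ps : List Int) (j : Int) :
    pvCatShift (ps ++ [j]) =
      pvCatShift ps + (match pvEnc ps with
        | none => 0
        | some (first, idx) => |j - (first + idx)|) := by
  cases ps with
  | nil =>
      simp [pvCatShift, pvEnc, PySem.List.pyRange_one_eq_nil]
  | cons p0 rest =>
      have hL : ((p0 :: rest ++ [j]).length : Int) = ((p0 :: rest).length : Int) + 1 := by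
        simp
      have h1L : (1 : Int) ≤ ((p0 :: rest).length : Int) := by
        simp
      unfold pvCatShift
      rw [hL, PySem.List.pyRange_one_succ_right h1L, List.foldl_append]
      simp only [List.foldl_cons, List.foldl_nil]
      have hcongr :
          (PySem.List.pyRange 1 ((p0 :: rest).length : Int) 1).foldl
            (fun s i => s + |PySem.List.pyGetD (p0 :: rest ++ [j]) i 0 -
              (PySem.List.pyGetD (p0 :: rest ++ [j]) 0 0 + i)|) 0 =
          (PySem.List.pyRange 1 ((p0 :: rest).length : Int) 1).foldl
            (fun s i => s + |PySem.List.pyGetD (p0 :: rest) i 0 -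
              (PySem.List.pyGetD (p0 :: rest) 0 0 + i)|) 0 := by
        apply PySem.List.foldl_congr_mem
        intro acc i hi
        rw [PySem.List.mem_pyRange_one] at hi
        have h0 : (0 : Int) ≤ i := by omega
        have h2 : i < ((p0 :: rest).length : Int) := hi.2
        have hiN : i.toNat < (p0 :: rest).length := by simp at h2 ⊢; omega
        rw [PySem.List.pyGetD_eq_getElem _ _ h0 (by simp at h2 ⊢; omega),
            PySem.List.pyGetD_eq_getElem _ _ h0 h2]
        congr 3
        · exact List.getElem_append_left hiN
        · simp [PySem.List.pyGetD_zero]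
      rw [hcongr]
      have hget : PySem.List.pyGetD (p0 :: rest ++ [j]) ((p0 :: rest).length : Int) 0 = j := by
        rw [PySem.List.pyGetD_eq_getElem _ _ (by positivity) (by rw [hL]; omega)]
        simp
      have hget0 : PySem.List.pyGetD (p0 :: rest ++ [j]) 0 0 = p0 := by
        simp [PySem.List.pyGetD_zero]
      rw [hget, hget0]
      simp [pvEnc]

lemma pvCatShift_nil : pvCatShift [] = 0 := by
  simp [pvCatShift, PySem.List.pyRange_one_eq_nil]

lemma pvCatShift_singleton (j : Int) : pvCatShift [j] = 0 := by
  simp [pvCatShift, PySem.List.pyRange_one_eq_nil]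

lemma pvInv_step (l : List (Int × String)) (d : PySem.Dict String (Int × Int)) (sh : Int)
    (h : pvInv l (d, sh)) (j : Int) (a : String) :
    pvInv (l ++ [(j, a)]) (pvStepB (d, sh) (j, a)) := by
  obtain ⟨hH, hS, hP, hD, hsum⟩ := h
  have hsum' : sh = pvCatShift (pvPositions l "H") + pvCatShift (pvPositions l "S") +
      pvCatShift (pvPositions l "P") + pvCatShift (pvPositions l "D") := hsum
  by_cases hcat : a = "H" ∨ a = "S" ∨ a = "P" ∨ a = "D"
  · rcases hcat with rfl | rfl | rfl | rfl
    · cases hp : pvPositions l "H" with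
      | nil =>
          have hg : d.get? "H" = none := by rw [hH, hp]; rfl
          refine ⟨?_, ?_, ?_, ?_, ?_⟩ <;>
            simp [pvStepB, hg, PySem.Dict.get?_insert, pvPositions_append, hp, pvEnc,
                  hH, hS, hP, hD, hsum', pvCatShift_nil, pvCatShift_singleton]
      | cons p0 rest =>
          have hg : d.get? "H" = some (p0, (rest.length : Int) + 1) := by rw [hH, hp]; rfl
          have hx := pvCatShift_append (p0 :: rest) j
          simp only [pvEnc, List.cons_append] at hx
          refine ⟨?_, ?_, ?_, ?_, ?_⟩ <;>
            simp [pvStepB, hg, PySem.Dict.get?_insert, pvPositions_append, hp, pvEnc,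
                  hH, hS, hP, hD, hsum', hx] <;> push_cast <;> ring_nf
    · cases hp : pvPositions l "S" with
      | nil =>
          have hg : d.get? "S" = none := by rw [hS, hp]; rfl
          refine ⟨?_, ?_, ?_, ?_, ?_⟩ <;>
            simp [pvStepB, hg, PySem.Dict.get?_insert, pvPositions_append, hp, pvEnc,
                  hH, hS, hP, hD, hsum', pvCatShift_nil, pvCatShift_singleton]
      | cons p0 rest =>
          have hg : d.get? "S" = some (p0, (rest.length : Int) + 1) := by rw [hS, hp]; rfl
          have hx := pvCatShift_append (p0 :: rest) j
          simp only [pvEnc, List.cons_append] at hx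
          refine ⟨?_, ?_, ?_, ?_, ?_⟩ <;>
            simp [pvStepB, hg, PySem.Dict.get?_insert, pvPositions_append, hp, pvEnc,
                  hH, hS, hP, hD, hsum', hx] <;> push_cast <;> ring_nf
    · cases hp : pvPositions l "P" with
      | nil =>
          have hg : d.get? "P" = none := by rw [hP, hp]; rfl
          refine ⟨?_, ?_, ?_, ?_, ?_⟩ <;>
            simp [pvStepB, hg, PySem.Dict.get?_insert, pvPositions_append, hp, pvEnc,
                  hH, hS, hP, hD, hsum', pvCatShift_nil, pvCatShift_singleton]
      | cons p0 rest =>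
          have hg : d.get? "P" = some (p0, (rest.length : Int) + 1) := by rw [hP, hp]; rfl
          have hx := pvCatShift_append (p0 :: rest) j
          simp only [pvEnc, List.cons_append] at hx
          refine ⟨?_, ?_, ?_, ?_, ?_⟩ <;>
            simp [pvStepB, hg, PySem.Dict.get?_insert, pvPositions_append, hp, pvEnc,
                  hH, hS, hP, hD, hsum', hx] <;> push_cast <;> ring_nf
    · cases hp : pvPositions l "D" with
      | nil =>
          have hg : d.get? "D" = none := by rw [hD, hp]; rfl
          refine ⟨?_, ?_, ?_, ?_, ?_⟩ <;>
            simp [pvStepB, hg, PySem.Dict.get?_insert, pvPositions_append, hp, pvEnc,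
                  hH, hS, hP, hD, hsum', pvCatShift_nil, pvCatShift_singleton]
      | cons p0 rest =>
          have hg : d.get? "D" = some (p0, (rest.length : Int) + 1) := by rw [hD, hp]; rfl
          have hx := pvCatShift_append (p0 :: rest) j
          simp only [pvEnc, List.cons_append] at hx
          refine ⟨?_, ?_, ?_, ?_, ?_⟩ <;>
            simp [pvStepB, hg, PySem.Dict.get?_insert, pvPositions_append, hp, pvEnc,
                  hH, hS, hP, hD, hsum', hx] <;> push_cast <;> ring_nf
  · push_neg at hcat
    obtain ⟨n1, n2, n3, n4⟩ := hcat
    refine ⟨?_, ?_, ?_, ?_, ?_⟩ <;>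
      simp [pvStepB, n1, n2, n3, n4, pvPositions_append, hH, hS, hP, hD, hsum']

lemma pvInv_fold (l : List (Int × String)) :
    pvInv l (l.foldl pvStepB (PySem.Dict.empty, 0)) := by
  induction l using List.reverseRecOn with
  | nil =>
      refine ⟨?_, ?_, ?_, ?_, ?_⟩ <;>
        simp [pvPositions, pvEnc, pvCatShift, PySem.List.pyRange_one_eq_nil]
  | append_singleton l p ih =>
      rw [List.foldl_append, List.foldl_cons, List.foldl_nil]
      obtain ⟨j, a⟩ := p
      rcases hst : List.foldl pvStepB (PySem.Dict.empty, 0) l with ⟨d, sh⟩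
      rw [hst] at ih
      exact pvInv_step l d sh ih j a

theorem pv_main (n : Int) (row : List String) : art_shift n row = art_shift_alt n row := by
  have h := (pvInv_fold (PySem.List.enumerate row)).2.2.2.2
  simp only [art_shift, art_shift_alt, List.foldl_cons, List.foldl_nil]
  rw [h]
  congr 1
  ring

-- ===== VERDICT (by name: the statement is the Claim_ definition above) =====
theorem art_shift_spec : Claim_equal_art_shift := by
  intro n row _
  unfold Spec_art_shift
  exact pv_main n row
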